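-- pv_equiv track=rewrite | github.com/pribanacek/cicadas | src/topology/RandomAssembler.py | validPathPair
-- ===== SOURCE A (Python) =====
-- def validPathPair(pathA, pathB):
--     visited = {
--         pathA[0][0]: True, # start node
--         pathA[-1][0]: True # end node
--     }
--     for _, end, _ in pathA[1:-1]:
--         if end in visited:
--             return False
--         visited[end] = True
--     for _, end, _ in pathB[1:-1]:
--         if end in visited:
--             return False
--         visited[end] = True
--     return True
-- ===== SOURCE B (Python) =====
-- def validPathPair(pathA, pathB):
--     labels = [pathA[0][0]]
--     if pathA[-1][0] != pathA[0][0]: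
--         labels.append(pathA[-1][0])
--     for _, end, _ in pathA[1:-1]:
--         labels.append(end)
--     for _, end, _ in pathB[1:-1]:
--         labels.append(end)
--     labels.sort()
--     return all(x < y for x, y in zip(labels, labels[1:]))
-- ===== Notes on version B (the rewrite author's own statement) =====
-- stated objective: alternative
-- what changed: B collects all node labels (the two endpoints deduplicated, then every intermediate label) into one list, sorts it, and returns whether the sorted list is strictly increasing at adjacent positions -- duplicate detection by comparison sorting instead of A's incremental hash-set membership loops with early return.
import Mathlib
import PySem

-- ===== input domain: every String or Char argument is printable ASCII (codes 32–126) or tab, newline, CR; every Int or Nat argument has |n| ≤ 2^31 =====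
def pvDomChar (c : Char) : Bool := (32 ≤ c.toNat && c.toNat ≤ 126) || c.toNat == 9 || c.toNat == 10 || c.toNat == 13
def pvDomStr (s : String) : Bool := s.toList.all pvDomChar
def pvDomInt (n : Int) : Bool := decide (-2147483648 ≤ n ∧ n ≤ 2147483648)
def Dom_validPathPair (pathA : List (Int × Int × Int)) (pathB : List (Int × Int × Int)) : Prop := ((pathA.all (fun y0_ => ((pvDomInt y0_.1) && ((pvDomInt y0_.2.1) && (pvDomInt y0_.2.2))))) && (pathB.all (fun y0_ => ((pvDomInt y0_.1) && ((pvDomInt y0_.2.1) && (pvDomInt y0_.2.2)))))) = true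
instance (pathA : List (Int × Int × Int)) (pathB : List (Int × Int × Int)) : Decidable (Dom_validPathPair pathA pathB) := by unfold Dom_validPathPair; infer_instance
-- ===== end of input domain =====

-- B detects duplicate node labels by sorting all labels and checking the sorted list is
-- strictly increasing at adjacent positions, instead of A's incremental dict-membership
-- loops with early return (objective: alternative algorithm, comparison sort vs hashing).


-- ===== PORT A =====
-- the for-loop body shared by A's two loops: check 'end in visited', else visited[end] = True
def pvVisitLoop (visited : PySem.Dict Int Bool) : List (Int × Int × Int) → Option (PySem.Dict Int Bool)
  | [] => some visited
  | (_, e, _) :: rest =>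
      if visited.contains e then none else pvVisitLoop (visited.insert e true) rest

def validPathPair (pathA : List (Int × Int × Int)) (pathB : List (Int × Int × Int)) : Bool :=
  match PySem.List.pyGet? pathA 0, PySem.List.pyGet? pathA (-1) with
  | some s, some l =>
    let visited : PySem.Dict Int Bool := (PySem.Dict.empty.insert s.1 true).insert l.1 true
    match pvVisitLoop visited (PySem.List.slice pathA (some 1) (some (-1))) with
    | none => false
    | some visited' =>
      match pvVisitLoop visited' (PySem.List.slice pathB (some 1) (some (-1))) with
      | none => false
      | some _ => true
  | _, _ => false  -- pathA[0] raises IndexError on empty pathA; excluded by Pre_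

-- ===== PORT B =====
-- all(x < y for x, y in zip(labels, labels[1:])) : adjacent-strict scan
def pvAdjLt : List Int → Bool
  | x :: y :: rest => decide (x < y) && pvAdjLt (y :: rest)
  | _ => true

def validPathPair_alt (pathA : List (Int × Int × Int)) (pathB : List (Int × Int × Int)) : Bool :=
  -- pathA[0] / pathA[-1] raise IndexError on empty pathA (the 'false' arms); excluded by Pre_
  (PySem.List.pyGet? pathA 0).elim false fun s =>
  (PySem.List.pyGet? pathA (-1)).elim false fun l =>
    let labels1 : List Int := [s.1]
    let labels2 : List Int := if l.1 ≠ s.1 then labels1 ++ [l.1] else labels1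
    let labels3 : List Int :=
      labels2 ++ (PySem.List.slice pathA (some 1) (some (-1))).map (fun t => t.2.1)
    let labels4 : List Int :=
      labels3 ++ (PySem.List.slice pathB (some 1) (some (-1))).map (fun t => t.2.1)
    pvAdjLt (PySem.List.sorted labels4 (fun x => x) false)

-- ===== PRECONDITION & SPEC =====
-- A (and B) raise IndexError on empty pathA (pathA[0]); Pre_ excludes exactly that.
def Pre_validPathPair (pathA : List (Int × Int × Int)) (pathB : List (Int × Int × Int)) : Prop := pathA ≠ []
instance (pathA : List (Int × Int × Int)) (pathB : List (Int × Int × Int)) : Decidable (Pre_validPathPair pathA pathB) := by unfold Pre_validPathPair; infer_instance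
def pvWitness_validPathPair : (List (Int × Int × Int)) × (List (Int × Int × Int)) := ([(0, 1, 2), (3, 4, 5)], [(0, 6, 7)])
def Spec_validPathPair (pathA : List (Int × Int × Int)) (pathB : List (Int × Int × Int)) (out : Bool) : Prop := out = validPathPair_alt pathA pathB
instance (pathA : List (Int × Int × Int)) (pathB : List (Int × Int × Int)) (out : Bool) : Decidable (Spec_validPathPair pathA pathB out) := by unfold Spec_validPathPair; infer_instance

-- ===== CLAIM =====
def Claim_equal_validPathPair : Prop := ∀ (pathA : List (Int × Int × Int)) (pathB : List (Int × Int × Int)), Dom_validPathPair pathA pathB → Pre_validPathPair pathA pathB → Spec_validPathPair pathA pathB (validPathPair pathA pathB)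

-- ===== LEMMAS AND PROOFS =====

-- A's two sequential loops over the threaded dict = one loop over the concatenation
theorem pvVisitLoop_append (d : PySem.Dict Int Bool) (xs ys : List (Int × Int × Int)) :
    pvVisitLoop d (xs ++ ys) = (pvVisitLoop d xs).bind (fun v => pvVisitLoop v ys) := by
  induction xs generalizing d with
  | nil => rfl
  | cons x rest ih =>
    obtain ⟨_, e, _⟩ := x
    simp only [List.cons_append, pvVisitLoop]
    split_ifs with h
    · rfl
    · exact ih _

-- characterisation of A's loop succeeding: middle labels nodup and none already visited
theorem pvVisitLoop_isSome (d : PySem.Dict Int Bool) (xs : List (Int × Int × Int)) :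
    (pvVisitLoop d xs).isSome = true ↔
      (xs.map (fun t => t.2.1)).Nodup ∧ ∀ e ∈ xs.map (fun t => t.2.1), d.contains e = false := by
  induction xs generalizing d with
  | nil => simp [pvVisitLoop]
  | cons x rest ih =>
    obtain ⟨_, e, _⟩ := x
    simp only [pvVisitLoop, List.map_cons, List.nodup_cons, List.mem_cons]
    split_ifs with h
    · simp only [Option.isSome_none, Bool.false_eq_true, false_iff]
      intro ⟨_, hc⟩
      have := hc e (Or.inl rfl)
      rw [this] at h; exact Bool.false_ne_true h
    · rw [ih]
      constructor
      · rintro ⟨hnd, hall⟩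
        refine ⟨⟨fun hmem => ?_, hnd⟩, ?_⟩
        · have := hall e hmem
          rw [PySem.Dict.contains_insert] at this
          simp at this
        · rintro f (rfl | hf)
          · exact eq_false_of_ne_true h
          · have := hall f hf
            rw [PySem.Dict.contains_insert] at this
            simp only [Bool.or_eq_false_iff] at this
            exact this.2
      · rintro ⟨⟨hne, hnd⟩, hall⟩
        refine ⟨hnd, fun f hf => ?_⟩
        rw [PySem.Dict.contains_insert]
        have hfe : f ≠ e := fun hfe => hne (hfe ▸ hf)
        simp [hfe, hall f (Or.inr hf)]

-- adjacent-strict scan on a list = pairwise strict (by transitivity of <)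
theorem pvAdjLt_iff_pairwise (l : List Int) : pvAdjLt l = true ↔ l.Pairwise (· < ·) := by
  induction l with
  | nil => simp [pvAdjLt]
  | cons x rest ih =>
    cases rest with
    | nil => simp [pvAdjLt]
    | cons y t =>
      simp only [pvAdjLt, Bool.and_eq_true, decide_eq_true_eq]
      rw [ih]
      constructor
      · rintro ⟨hxy, hp⟩
        refine List.pairwise_cons.2 ⟨?_, hp⟩
        intro z hz
        rw [List.mem_cons] at hz
        rcases hz with rfl | hz
        · omega
        · have := (List.pairwise_cons.1 hp).1 z hz
          omega
      · intro hp
        have h1 := (List.pairwise_cons.1 hp).1 y (by simp)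
        exact ⟨h1, (List.pairwise_cons.1 hp).2⟩

-- on the sorted list, adjacent-strict ↔ the original list has no duplicates
theorem pvAdjLt_sorted_iff_nodup (l : List Int) :
    pvAdjLt (PySem.List.sorted l (fun x => x) false) = true ↔ l.Nodup := by
  rw [pvAdjLt_iff_pairwise]
  have hperm : (PySem.List.sorted l (fun x => x) false).Perm l := PySem.List.sorted_perm l _ false
  constructor
  · intro hlt
    have hne : (PySem.List.sorted l (fun x => x) false).Pairwise (· ≠ ·) :=
      hlt.imp (fun h => ne_of_lt h)
    exact hperm.nodup_iff.mp hne
  · intro hnd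
    have hle : (PySem.List.sorted l (fun x => x) false).Pairwise (· ≤ ·) := by
      have := PySem.List.sorted_pairwise (xs := l) (key := fun x : Int => x)
      exact this
    have hne : (PySem.List.sorted l (fun x => x) false).Pairwise (· ≠ ·) :=
      hperm.nodup_iff.mpr hnd
    exact (hle.and hne).imp (fun h => lt_of_le_of_ne h.1 h.2)

theorem validPathPair_eq (pathA pathB : List (Int × Int × Int)) :
    validPathPair pathA pathB = validPathPair_alt pathA pathB := by
  unfold validPathPair validPathPair_alt
  cases h0 : PySem.List.pyGet? pathA 0 with
  | none => cases hl : PySem.List.pyGet? pathA (-1) <;> rfl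
  | some s =>
  cases hl : PySem.List.pyGet? pathA (-1) with
  | none => rfl
  | some l =>
  simp only [Option.elim]
  set d0 : PySem.Dict Int Bool := (PySem.Dict.empty.insert s.1 true).insert l.1 true with hd0
  set sA := PySem.List.slice pathA (some 1) (some (-1))
  set sB := PySem.List.slice pathB (some 1) (some (-1))
  set M : List Int := sA.map (fun t => t.2.1) ++ sB.map (fun t => t.2.1) with hM
  set eps : List Int := if l.1 ≠ s.1 then [s.1] ++ [l.1] else [s.1] with heps
  -- left side is isSome of the loop over sA ++ sB
  have hseq : (match pvVisitLoop d0 sA with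
      | none => false
      | some v => match pvVisitLoop v sB with
        | none => false
        | some _ => true) = (pvVisitLoop d0 (sA ++ sB)).isSome := by
    rw [pvVisitLoop_append]
    cases pvVisitLoop d0 sA with
    | none => rfl
    | some v =>
      show (match pvVisitLoop v sB with
        | none => false
        | some _ => true) = (pvVisitLoop v sB).isSome
      cases pvVisitLoop v sB <;> rfl
  show (match pvVisitLoop d0 sA with
      | none => false
      | some v => match pvVisitLoop v sB with
        | none => false
        | some _ => true) = pvAdjLt (PySem.List.sorted ((eps ++ sA.map (fun t => t.2.1)) ++ sB.map (fun t => t.2.1)) (fun x => x) false)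
  rw [List.append_assoc, hseq, Bool.eq_iff_iff, pvAdjLt_sorted_iff_nodup]
  show _ ↔ (eps ++ M).Nodup
  have hchar := pvVisitLoop_isSome d0 (sA ++ sB)
  have hmap : (sA ++ sB).map (fun t => t.2.1) = M := by simp [hM]
  rw [hmap] at hchar
  rw [hchar]
  have hd0c : ∀ e : Int, d0.contains e = (e == l.1 || e == s.1) := by
    intro e
    rw [hd0, PySem.Dict.contains_insert, PySem.Dict.contains_insert]
    simp [PySem.Dict.contains_empty]
  have hepsnd : eps.Nodup := by
    rw [heps]; split_ifs with h
    · simp only [List.cons_append, List.nil_append, List.nodup_cons, List.mem_singleton,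
        List.not_mem_nil, not_false_iff, List.nodup_nil, and_true, List.nodup_singleton]
      omega
    · simp
  have hepsmem : ∀ x, x ∈ eps ↔ (x = s.1 ∨ x = l.1) := by
    intro x
    rw [heps]; split_ifs with h
    · simp
    · simp only [ne_eq, not_not] at h
      rw [h]
      simp
  constructor
  · rintro ⟨hnd, hall⟩
    refine List.Nodup.append hepsnd hnd ?_
    intro x hx hxM
    have := hall x hxM
    rw [hd0c x] at this
    rcases (hepsmem x).1 hx with rfl | rfl <;> simp at this
  · intro hall
    obtain ⟨_, hnd, hdisj⟩ := List.nodup_append'.1 hall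
    refine ⟨hnd, fun e he => ?_⟩
    rw [hd0c e]
    have hsM : s.1 ∉ M := fun hmem => hdisj ((hepsmem s.1).2 (Or.inl rfl)) hmem
    have hlM : l.1 ∉ M := fun hmem => hdisj ((hepsmem l.1).2 (Or.inr rfl)) hmem
    have h1 : e ≠ s.1 := fun h => hsM (h ▸ he)
    have h2 : e ≠ l.1 := fun h => hlM (h ▸ he)
    simp [h1, h2]

-- ===== VERDICT =====
theorem validPathPair_spec : Claim_equal_validPathPair := by
  intro pathA pathB _ _
  unfold Spec_validPathPair
  exact validPathPair_eq pathA pathB
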